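-- pv_equiv track=rewrite | github.com/as1515/Data_Visualization_Streamlit | streamlit_app_structure/common_v.py | convert_month_to_number
-- ===== SOURCE A (Python) =====
-- def convert_month_to_number(month):
--     """
--     Convert month name or string to its numeric representation.
--
--     Parameters:
--     - month: Month name or string representation
--
--     Returns:
--     - Numeric month (1-12)
--     """
--     month_mapping = {
--         'January': 1, 'Jan': 1,
--         'February': 2, 'Feb': 2,
--         'March': 3, 'Mar': 3,
--         'April': 4, 'Apr': 4,
--         'May': 5,
--         'June': 6, 'Jun': 6,
--         'July': 7, 'Jul': 7,
--         'August': 8, 'Aug': 8,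
--         'September': 9, 'Sep': 9,
--         'October': 10, 'Oct': 10,
--         'November': 11, 'Nov': 11,
--         'December': 12, 'Dec': 12
--     }
--
--     # If it's already a number, convert to int
--     if isinstance(month, (int, float)):
--         return int(month)
--
--     # If it's a string, look up in mapping
--     if isinstance(month, str):
--         # Try exact match first
--         if month in month_mapping:
--             return month_mapping[month]
--
--         # Try case-insensitive match
--         month_lower = month.lower()
--         for key, value in month_mapping.items():
--             if key.lower() == month_lower:
--                 return value
--
--     # If no match found, raise an error
--     raise ValueError(f"Could not convert month: {month}")
-- ===== SOURCE B (Python) =====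
-- _MONTH_NAMES = (
--     'january', 'february', 'march', 'april', 'may', 'june',
--     'july', 'august', 'september', 'october', 'november', 'december',
-- )
--
--
-- def convert_month_to_number(month):
--     if isinstance(month, (int, float)):
--         return int(month)
--     if isinstance(month, str):
--         m = month.lower()
--         for i, name in enumerate(_MONTH_NAMES):
--             if m == name or m == name[:3]:
--                 return i + 1
--     raise ValueError(f"Could not convert month: {month}")
-- ===== Notes on version B (the rewrite author's own statement) =====
-- stated objective: alternative
-- what changed: Replaces the 23-entry name->number dict (exact test plus a lowercased linear scan over items) with a positional scan of the 12 full month names: the lowercased input is matched against each name or its 3-letter prefix and the month number is the position, so no abbreviation table or dict exists at all.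
import Mathlib
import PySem

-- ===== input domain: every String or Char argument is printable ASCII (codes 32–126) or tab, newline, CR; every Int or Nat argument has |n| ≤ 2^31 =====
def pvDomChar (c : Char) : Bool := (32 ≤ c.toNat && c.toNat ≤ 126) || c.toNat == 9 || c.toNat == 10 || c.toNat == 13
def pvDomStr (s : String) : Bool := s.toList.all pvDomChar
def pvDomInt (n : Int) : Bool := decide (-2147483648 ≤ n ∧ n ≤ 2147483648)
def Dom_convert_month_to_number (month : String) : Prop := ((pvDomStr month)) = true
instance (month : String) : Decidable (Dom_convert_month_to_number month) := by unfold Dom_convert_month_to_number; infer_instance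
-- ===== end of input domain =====

-- B scans a positional list of the 12 full month names, matching the lowercased input
-- against the name or its 3-letter prefix; the month number is the position + 1, so the
-- 23-entry dict and its lowercased item scan disappear. Inputs where the Python A raises
-- ValueError are excluded by Pre_; the isinstance int/float branch is unreachable for the
-- String-typed argument and is not ported.

-- ===== PORT A =====
def pvMonthMapping : PySem.Dict String Int := PySem.Dict.ofList [
  ("January", 1), ("Jan", 1), ("February", 2), ("Feb", 2), ("March", 3), ("Mar", 3),
  ("April", 4), ("Apr", 4), ("May", 5), ("June", 6), ("Jun", 6), ("July", 7), ("Jul", 7),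
  ("August", 8), ("Aug", 8), ("September", 9), ("Sep", 9), ("October", 10), ("Oct", 10),
  ("November", 11), ("Nov", 11), ("December", 12), ("Dec", 12)]

-- the 'for key, value in month_mapping.items()' loop with early return
def pvScanA : List (String × Int) → String → Option Int
  | [], _ => none
  | (k, v) :: rest, ml => if PySem.Str.lower k == ml then some v else pvScanA rest ml

def convert_month_to_number (month : String) : Int :=
  if pvMonthMapping.contains month then pvMonthMapping.getD month 0
  else
    match pvScanA pvMonthMapping.items (PySem.Str.lower month) with
    | some v => v
    | none => 0  -- Python raises ValueError here; excluded by Pre_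

-- ===== PORT B =====
def pvMonthNames : List String :=
  ["january", "february", "march", "april", "may", "june",
   "july", "august", "september", "october", "november", "december"]

-- the 'for i, name in enumerate(_MONTH_NAMES)' loop; name[:3] is ported exactly as
-- PySem.List.slice on the character list (string compares done on toList)
def pvScanB (m : List Char) : List (Int × String) → Option Int
  | [] => none
  | (i, name) :: rest =>
      if m == name.toList || m == PySem.List.slice name.toList none (some 3) then some (i + 1)
      else pvScanB m rest

def convert_month_to_number_alt (month : String) : Int :=
  match pvScanB (PySem.Str.lower month).toList (PySem.List.enumerate pvMonthNames) with
  | some v => v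
  | none => 0  -- Python raises ValueError here; excluded by Pre_

-- ===== PRECONDITION & SPEC =====
-- Pre_ excludes exactly the strings on which the Python A raises ValueError
-- (those whose lowercase form is not a month name or 3-letter abbreviation).
def Pre_convert_month_to_number (month : String) : Prop :=
  PySem.Str.lower month ∈ ["january", "jan", "february", "feb", "march", "mar",
    "april", "apr", "may", "june", "jun", "july", "jul", "august", "aug",
    "september", "sep", "october", "oct", "november", "nov", "december", "dec"]
instance (month : String) : Decidable (Pre_convert_month_to_number month) := by
  unfold Pre_convert_month_to_number; infer_instance

def pvWitness_convert_month_to_number : String := "January"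

def Spec_convert_month_to_number (month : String) (out : Int) : Prop := out = convert_month_to_number_alt month
instance (month : String) (out : Int) : Decidable (Spec_convert_month_to_number month out) := by unfold Spec_convert_month_to_number; infer_instance

-- ===== CLAIM (what is proved, stated in full; the proofs are below) =====
def Claim_equal_convert_month_to_number : Prop := ∀ (month : String), Dom_convert_month_to_number month → Pre_convert_month_to_number month → Spec_convert_month_to_number month (convert_month_to_number month)

-- ===== LEMMAS AND PROOFS =====

-- ===== VERDICT (by name: the statement is the Claim_ definition above) =====
theorem convert_month_to_number_spec : Claim_equal_convert_month_to_number := by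
  intro month _ hpre
  unfold Spec_convert_month_to_number
  by_cases hc : pvMonthMapping.contains month = true
  · -- exact-match branch: month is one of the 23 literal keys
    have hm : month ∈ pvMonthMapping.keys := (PySem.Dict.contains_iff_mem_keys _ _).mp hc
    have hk : pvMonthMapping.keys = ["January", "Jan", "February", "Feb", "March", "Mar",
        "April", "Apr", "May", "June", "Jun", "July", "Jul", "August", "Aug",
        "September", "Sep", "October", "Oct", "November", "Nov", "December", "Dec"] := by decide
    rw [hk] at hm
    simp only [List.mem_cons, List.not_mem_nil, or_false] at hm
    rcases hm with h|h|h|h|h|h|h|h|h|h|h|h|h|h|h|h|h|h|h|h|h|h|h <;> subst h <;> decide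
  · -- scan branch: A falls through to the case-insensitive items loop
    unfold convert_month_to_number convert_month_to_number_alt
    rw [if_neg hc]
    unfold Pre_convert_month_to_number at hpre
    simp only [List.mem_cons, List.not_mem_nil, or_false] at hpre
    rcases hpre with h|h|h|h|h|h|h|h|h|h|h|h|h|h|h|h|h|h|h|h|h|h|h <;> rw [h] <;> decide
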